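-- pv_equiv track=rewrite | github.com/yam89421/MLH-EPILEPSY-EEG | P1_lgbm_all_feats.py | find_seizure_episodes
-- ===== SOURCE A (Python) =====
-- STEP_SEC     = 1.0         # 6s window, 1s step (Detti et al. 2019)
--
-- PREICTAL_SEC         = 300   # prediction interval: 5 min (paper uses 150/200/300s; we use max)
--
-- MIN_INTER_SEIZURE_SEC = 1300 # ignore seizures separated by less than this (paper value)
--
-- def find_seizure_episodes(labels):
--     """
--     Identify continuous blocks of label==1 (ictal) or label==2 (preictal).
--     Applies Detti et al. filters:
--       - preictal trimmed to last PREICTAL_SEC seconds before ictal onset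
--       - episodes closer than MIN_INTER_SEIZURE_SEC to the previous one are dropped
--     Returns list of dicts with keys: preictal_start, ictal_start, ictal_end.
--     """
--     n = len(labels)
--     raw_episodes = []
--     i = 0
--     while i < n:
--         if labels[i] == 2:
--             pre_start = i
--             while i < n and labels[i] == 2:
--                 i += 1
--             ictal_start = i
--             while i < n and labels[i] == 1:
--                 i += 1
--             ictal_end = i
--             raw_episodes.append({
--                 "preictal_start": pre_start,
--                 "ictal_start":    ictal_start,
--                 "ictal_end":      ictal_end,
--             })
--         else:
--             i += 1
--
--     # Filter: drop episodes too close to the previous one (< MIN_INTER_SEIZURE_SEC)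
--     min_gap_windows = int(MIN_INTER_SEIZURE_SEC / STEP_SEC)
--     filtered = []
--     for ep in raw_episodes:
--         if filtered:
--             gap = ep["preictal_start"] - filtered[-1]["ictal_end"]
--             if gap < min_gap_windows:
--                 continue
--         filtered.append(ep)
--
--     # Trim preictal to last PREICTAL_SEC seconds before ictal onset
--     preictal_windows = int(PREICTAL_SEC / STEP_SEC)
--     episodes = []
--     for ep in filtered:
--         trimmed_pre = max(ep["preictal_start"], ep["ictal_start"] - preictal_windows)
--         episodes.append({
--             "preictal_start": trimmed_pre,
--             "ictal_start":    ep["ictal_start"],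
--             "ictal_end":      ep["ictal_end"],
--         })
--
--     return episodes
-- ===== SOURCE B (Python) =====
-- from itertools import groupby
--
-- STEP_SEC     = 1.0
-- PREICTAL_SEC         = 300
-- MIN_INTER_SEIZURE_SEC = 1300
--
-- def find_seizure_episodes(labels):
--     """Run-length-encode the labels once, then walk the runs emitting each
--     kept, trimmed episode directly (gap filter fused via last_end)."""
--     runs = []
--     pos = 0
--     for val, grp in groupby(labels):
--         length = sum(1 for _ in grp)
--         runs.append((val, pos, pos + length))
--         pos += length
--
--     min_gap_windows  = int(MIN_INTER_SEIZURE_SEC / STEP_SEC)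
--     preictal_windows = int(PREICTAL_SEC / STEP_SEC)
--
--     episodes = []
--     last_end = None
--     k = 0
--     while k < len(runs):
--         val, a, b = runs[k]
--         if val == 2:
--             if k + 1 < len(runs) and runs[k + 1][0] == 1:
--                 ictal_end = runs[k + 1][2]
--                 k += 2
--             else:
--                 ictal_end = b
--                 k += 1
--             if last_end is None or a - last_end >= min_gap_windows:
--                 episodes.append({
--                     "preictal_start": max(a, b - preictal_windows),
--                     "ictal_start":    b,
--                     "ictal_end":      ictal_end,
--                 })
--                 last_end = ictal_end
--         else:
--             k += 1
--     return episodes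
-- ===== Notes on version B (the rewrite author's own statement) =====
-- stated objective: alternative
-- what changed: Replaces A's three separate passes (index-based state-machine scan building raw episodes, then a gap filter, then a trim map) by a run-length encoding of the labels followed by one walk over the runs that emits each kept, already-trimmed episode directly while tracking the last accepted ictal end.
import Mathlib
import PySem

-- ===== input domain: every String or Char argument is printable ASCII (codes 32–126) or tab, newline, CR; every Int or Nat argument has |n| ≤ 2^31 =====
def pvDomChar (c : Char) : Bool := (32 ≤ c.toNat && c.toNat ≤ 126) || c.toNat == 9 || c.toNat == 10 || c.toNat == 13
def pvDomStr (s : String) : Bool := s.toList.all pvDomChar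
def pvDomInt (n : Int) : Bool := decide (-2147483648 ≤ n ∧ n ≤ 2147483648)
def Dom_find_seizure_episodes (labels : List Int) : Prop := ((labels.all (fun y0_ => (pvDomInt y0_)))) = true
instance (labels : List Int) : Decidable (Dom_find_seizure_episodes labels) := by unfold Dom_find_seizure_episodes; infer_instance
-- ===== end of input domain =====

-- B replaces A's three passes (index state machine, gap filter, trim map) by a run-length
-- encoding followed by one walk over the runs emitting kept, trimmed episodes directly
-- (objective: alternative decomposition, same O(n) cost).

-- ===== PORT A =====
-- inner `while i < n and labels[i] == v: i += 1`
def skipWhileA (labels : List Int) (v : Int) (i : Nat) : Nat :=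
  if i < labels.length then
    if labels.getD i 0 = v then skipWhileA labels v (i + 1) else i
  else i
termination_by labels.length - i

theorem skipWhileA_le (labels : List Int) (v : Int) (i : Nat) : i ≤ skipWhileA labels v i := by
  unfold skipWhileA
  split
  · split
    · exact le_trans (Nat.le_succ i) (skipWhileA_le labels v (i + 1))
    · exact le_refl i
  · exact le_refl i
termination_by labels.length - i

theorem skipWhileA_lt (labels : List Int) (v : Int) (i : Nat)
    (h : i < labels.length) (hv : labels.getD i 0 = v) : i < skipWhileA labels v i := by
  unfold skipWhileA
  rw [if_pos h, if_pos hv]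
  exact Nat.lt_of_lt_of_le (Nat.lt_succ_self i) (skipWhileA_le labels v (i + 1))

-- outer `while i < n:` building raw_episodes as (preictal_start, ictal_start, ictal_end)
def rawEps (labels : List Int) (i : Nat) : List (Nat × Nat × Nat) :=
  if h : i < labels.length then
    if h2 : labels.getD i 0 = 2 then
      (i, skipWhileA labels 2 i, skipWhileA labels 1 (skipWhileA labels 2 i))
        :: rawEps labels (skipWhileA labels 1 (skipWhileA labels 2 i))
    else rawEps labels (i + 1)
  else []
termination_by labels.length - i
decreasing_by
  · have h1 : i < skipWhileA labels 2 i := skipWhileA_lt labels 2 i h h2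
    have h3 : skipWhileA labels 2 i ≤ skipWhileA labels 1 (skipWhileA labels 2 i) :=
      skipWhileA_le labels 1 _
    omega
  · omega

def find_seizure_episodes (labels : List Int) : List (List (String × Int)) :=
  let raw_episodes := rawEps labels 0
  let min_gap_windows : Int := 1300   -- int(MIN_INTER_SEIZURE_SEC / STEP_SEC) = int(1300/1.0), exactly 1300
  let filtered := raw_episodes.foldl (fun acc ep =>
    match acc.getLast? with
    | some prev => if (ep.1 : Int) - (prev.2.2 : Int) < min_gap_windows then acc else acc ++ [ep]
    | none => acc ++ [ep]) []
  let preictal_windows : Int := 300   -- int(PREICTAL_SEC / STEP_SEC) = int(300/1.0), exactly 300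
  filtered.map (fun ep =>
    [("preictal_start", max (ep.1 : Int) ((ep.2.1 : Int) - preictal_windows)),
     ("ictal_start", (ep.2.1 : Int)),
     ("ictal_end", (ep.2.2 : Int))])

-- ===== PORT B =====
-- run-length encoding pass: list of (value, start, end) blocks
def runsOf : List Int → Nat → List (Int × Nat × Nat)
  | [], _ => []
  | x :: xs, s =>
    (x, s, s + 1 + (xs.takeWhile (fun y => decide (y = x))).length)
      :: runsOf (xs.dropWhile (fun y => decide (y = x)))
           (s + 1 + (xs.takeWhile (fun y => decide (y = x))).length)
termination_by ys _ => ys.length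
decreasing_by
  exact Nat.lt_succ_of_le (List.length_dropWhile_le _ _)

-- `last_end is None or a - last_end >= min_gap_windows`
def keepGap (last : Option Int) (a : Nat) : Bool :=
  match last with
  | none => true
  | some le => decide ((1300 : Int) ≤ (a : Int) - le)

def mkEp (a b ie : Nat) : List (String × Int) :=
  [("preictal_start", max (a : Int) ((b : Int) - 300)),
   ("ictal_start", (b : Int)),
   ("ictal_end", (ie : Int))]

-- the `while k < len(runs):` walk (consumes one run, or two when a 1-run follows a 2-run)
def emitRuns : List (Int × Nat × Nat) → Option Int → List (List (String × Int))
  | [], _ => []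
  | [(v, a, b)], last =>
    if v = 2 then (if keepGap last a then [mkEp a b b] else []) else []
  | (v, a, b) :: (v', a', b') :: rs, last =>
    if v = 2 then
      if v' = 1 then
        if keepGap last a then mkEp a b b' :: emitRuns rs (some (b' : Int))
        else emitRuns rs last
      else
        if keepGap last a then mkEp a b b :: emitRuns ((v', a', b') :: rs) (some (b : Int))
        else emitRuns ((v', a', b') :: rs) last
    else emitRuns ((v', a', b') :: rs) last

def find_seizure_episodes_alt (labels : List Int) : List (List (String × Int)) :=
  emitRuns (runsOf labels 0) none

-- ===== PRECONDITION & SPEC =====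
def Spec_find_seizure_episodes (labels : List Int) (out : List (List (String × Int))) : Prop := out = find_seizure_episodes_alt labels
instance (labels : List Int) (out : List (List (String × Int))) : Decidable (Spec_find_seizure_episodes labels out) := by unfold Spec_find_seizure_episodes; infer_instance

-- ===== CLAIM (what is proved, stated in full; the proofs are below) =====
def Claim_equal_find_seizure_episodes : Prop := ∀ (labels : List Int), Dom_find_seizure_episodes labels → Spec_find_seizure_episodes labels (find_seizure_episodes labels)

-- ===== LEMMAS AND PROOFS =====

-- structural (list-recursion) form of A's index scan; proof-only helper
def rawStruct : List Int → Nat → List (Nat × Nat × Nat)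
  | [], _ => []
  | x :: xs, i =>
    if x = 2 then
      (i, i + 1 + (xs.takeWhile (fun y => decide (y = 2))).length,
       i + 1 + (xs.takeWhile (fun y => decide (y = 2))).length
         + ((xs.dropWhile (fun y => decide (y = 2))).takeWhile (fun y => decide (y = 1))).length)
        :: rawStruct ((xs.dropWhile (fun y => decide (y = 2))).dropWhile (fun y => decide (y = 1)))
             (i + 1 + (xs.takeWhile (fun y => decide (y = 2))).length
               + ((xs.dropWhile (fun y => decide (y = 2))).takeWhile (fun y => decide (y = 1))).length)
    else rawStruct xs (i + 1)
termination_by ys _ => ys.length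
decreasing_by
  · have h1 := List.length_dropWhile_le (fun y => decide (y = 1)) (xs.dropWhile (fun y => decide (y = 2)))
    have h2 := List.length_dropWhile_le (fun y => decide (y = 2)) xs
    simp only [List.length_cons]
    omega
  · simp

-- fused filter+trim over raw episodes; proof-only helper
def trimKeep : List (Nat × Nat × Nat) → Option Int → List (List (String × Int))
  | [], _ => []
  | (ps, is_, ie) :: rest, last =>
    if keepGap last ps then mkEp ps is_ ie :: trimKeep rest (some (ie : Int))
    else trimKeep rest last

theorem dropWhile_eq_drop_len {α : Type} (l : List α) (p : α → Bool) :
    l.dropWhile p = l.drop (l.takeWhile p).length := by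
  induction l with
  | nil => simp
  | cons x xs ih => by_cases h : p x <;> simp [h, ih]

theorem getD_of_drop_cons (labels : List Int) (i : Nat) (x : Int) (xs : List Int)
    (h : labels.drop i = x :: xs) : labels.getD i 0 = x := by
  have h0 : labels[i]? = some x := by
    have h1 : (labels.drop i).head? = labels[i]? := List.head?_drop
    rw [h] at h1
    exact h1.symm
  simp [List.getD_eq_getElem?_getD, h0]

theorem length_le_of_drop_nil (labels : List Int) (i : Nat)
    (h : labels.drop i = []) : labels.length ≤ i := by
  have := List.drop_eq_nil_iff.mp h
  omega

theorem skipWhileA_eq (labels : List Int) (v : Int) :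
    ∀ (N i : Nat), labels.length - i ≤ N →
      skipWhileA labels v i = i + ((labels.drop i).takeWhile (fun y => decide (y = v))).length := by
  intro N
  induction N with
  | zero =>
    intro i hN
    rw [skipWhileA, if_neg (by omega), List.drop_eq_nil_of_le (by omega)]
    simp
  | succ n ih =>
    intro i hN
    by_cases hi : i < labels.length
    · have hdc : labels.drop i = labels[i] :: labels.drop (i + 1) := List.drop_eq_getElem_cons hi
      have hget : labels.getD i 0 = labels[i] := getD_of_drop_cons labels i _ _ hdc
      by_cases hv : labels[i] = v
      · rw [skipWhileA, if_pos hi, if_pos (by rw [hget]; exact hv)]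
        rw [ih (i + 1) (by omega), hdc, List.takeWhile_cons_of_pos (by simp [hv])]
        simp only [List.length_cons]
        omega
      · rw [skipWhileA, if_pos hi, if_neg (by rw [hget]; exact hv)]
        rw [hdc, List.takeWhile_cons_of_neg (by simp [hv])]
        simp
    · rw [skipWhileA, if_neg hi, List.drop_eq_nil_of_le (by omega)]
      simp

theorem rawEps_eq_rawStruct (labels : List Int) :
    ∀ (N : Nat) (ys : List Int) (i : Nat), ys.length ≤ N → labels.drop i = ys →
      rawEps labels i = rawStruct ys i := by
  intro N
  induction N with
  | zero =>
    intro ys i hN hdrop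
    have hys : ys = [] := List.length_eq_zero_iff.mp (by omega)
    subst hys
    rw [rawEps, dif_neg (by have := length_le_of_drop_nil labels i hdrop; omega), rawStruct]
  | succ n ih =>
    intro ys i hN hdrop
    match ys with
    | [] =>
      rw [rawEps, dif_neg (by have := length_le_of_drop_nil labels i hdrop; omega), rawStruct]
    | x :: xs =>
      have hi : i < labels.length := by
        by_contra hge
        rw [List.drop_eq_nil_of_le (by omega)] at hdrop
        exact absurd hdrop (by simp)
      have hget : labels.getD i 0 = x := getD_of_drop_cons labels i x xs hdrop
      simp only [List.length_cons] at hN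
      by_cases hx : x = 2
      · subst hx
        rw [rawEps, dif_pos hi, dif_pos hget, rawStruct, if_pos rfl]
        have hskip2 : skipWhileA labels 2 i
            = i + 1 + (xs.takeWhile (fun y => decide (y = 2))).length := by
          rw [skipWhileA_eq labels 2 (labels.length - i) i (le_refl _), hdrop,
            List.takeWhile_cons_of_pos (by simp)]
          simp only [List.length_cons]
          omega
        have hdrop2 : labels.drop (i + 1 + (xs.takeWhile (fun y => decide (y = 2))).length)
            = xs.dropWhile (fun y => decide (y = 2)) := by
          have h' : labels.drop (i + 1 + (xs.takeWhile (fun y => decide (y = 2))).length)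
              = (labels.drop i).drop ((xs.takeWhile (fun y => decide (y = 2))).length + 1) := by
            rw [List.drop_drop]; congr 1; omega
          rw [h', hdrop, List.drop_succ_cons, ← dropWhile_eq_drop_len]
        have hskip1 : skipWhileA labels 1 (i + 1 + (xs.takeWhile (fun y => decide (y = 2))).length)
            = i + 1 + (xs.takeWhile (fun y => decide (y = 2))).length
              + ((xs.dropWhile (fun y => decide (y = 2))).takeWhile (fun y => decide (y = 1))).length := by
          rw [skipWhileA_eq labels 1
            (labels.length - (i + 1 + (xs.takeWhile (fun y => decide (y = 2))).length)) _ (le_refl _)]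
          rw [hdrop2]
        have hdrop1 : labels.drop (i + 1 + (xs.takeWhile (fun y => decide (y = 2))).length
              + ((xs.dropWhile (fun y => decide (y = 2))).takeWhile (fun y => decide (y = 1))).length)
            = (xs.dropWhile (fun y => decide (y = 2))).dropWhile (fun y => decide (y = 1)) := by
          have h' : labels.drop (i + 1 + (xs.takeWhile (fun y => decide (y = 2))).length
                + ((xs.dropWhile (fun y => decide (y = 2))).takeWhile (fun y => decide (y = 1))).length)
              = (labels.drop (i + 1 + (xs.takeWhile (fun y => decide (y = 2))).length)).drop
                  ((xs.dropWhile (fun y => decide (y = 2))).takeWhile (fun y => decide (y = 1))).length := by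
            rw [List.drop_drop]
          rw [h', hdrop2, ← dropWhile_eq_drop_len]
        rw [hskip2, hskip1]
        have hlen : ((xs.dropWhile (fun y => decide (y = 2))).dropWhile (fun y => decide (y = 1))).length ≤ n := by
          have h1 := List.length_dropWhile_le (fun y => decide (y = 1)) (xs.dropWhile (fun y => decide (y = 2)))
          have h2 := List.length_dropWhile_le (fun y => decide (y = 2)) xs
          omega
        rw [ih _ _ hlen hdrop1]
      · rw [rawEps, dif_pos hi, dif_neg (by rw [hget]; exact hx), rawStruct, if_neg hx]
        apply ih xs _ (by omega)
        have h' : labels.drop (i + 1) = (labels.drop i).drop 1 := by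
          rw [List.drop_drop]
        rw [h', hdrop]
        simp

theorem emitRuns_cons_ne2 (v : Int) (a b : Nat) (rs : List (Int × Nat × Nat))
    (last : Option Int) (h : ¬ v = 2) :
    emitRuns ((v, a, b) :: rs) last = emitRuns rs last := by
  match rs with
  | [] => simp [emitRuns, h]
  | (v', a', b') :: rs' => simp [emitRuns, h]

theorem rawStruct_skip_ne2 :
    ∀ (pre zs : List Int) (s : Nat), (∀ y ∈ pre, ¬ y = 2) →
      rawStruct (pre ++ zs) s = rawStruct zs (s + pre.length) := by
  intro pre
  induction pre with
  | nil => intro zs s _; simp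
  | cons y ys ih =>
    intro zs s hall
    rw [List.cons_append, rawStruct, if_neg (hall y (by simp)),
      ih zs (s + 1) (fun z hz => hall z (by simp [hz]))]
    simp only [List.length_cons]
    congr 1
    omega

theorem emit_eq_trim :
    ∀ (N : Nat) (ys : List Int) (s : Nat) (last : Option Int), ys.length ≤ N →
      emitRuns (runsOf ys s) last = trimKeep (rawStruct ys s) last := by
  intro N
  induction N with
  | zero =>
    intro ys s last hN
    have : ys = [] := List.length_eq_zero_iff.mp (by omega)
    subst this
    simp [runsOf, rawStruct, emitRuns, trimKeep]
  | succ n ih =>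
    intro ys s last hN
    match ys with
    | [] => simp [runsOf, rawStruct, emitRuns, trimKeep]
    | x :: xs =>
      simp only [List.length_cons] at hN
      by_cases hx : x = 2
      · subst hx
        rw [runsOf, rawStruct, if_pos rfl]
        rcases hm : xs.dropWhile (fun y => decide (y = 2)) with _ | ⟨y, ys'⟩
        · cases hk : keepGap last s <;>
            simp [emitRuns, hk, trimKeep, rawStruct, runsOf]
        · have hs2len : (y :: ys').length ≤ xs.length := by
            rw [← hm]; exact List.length_dropWhile_le _ _
          simp only [List.length_cons] at hs2len
          by_cases hy : y = 1
          · subst hy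
            rw [runsOf, List.takeWhile_cons_of_pos (by simp), List.dropWhile_cons_of_pos (by simp)]
            have ihr : ∀ (X : Nat) (l' : Option Int),
                emitRuns (runsOf (ys'.dropWhile (fun z => decide (z = 1))) X) l'
                  = trimKeep (rawStruct (ys'.dropWhile (fun z => decide (z = 1))) X) l' := by
              intro X l'
              apply ih _ _ _ (by
                have := List.length_dropWhile_le (fun z => decide (z = 1)) ys'
                omega)
            cases hk : keepGap last s <;>
              simp [emitRuns, hk, trimKeep, mkEp, ihr, add_comm, add_left_comm, add_assoc,
                Nat.cast_add, Nat.cast_one]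
          · rw [List.takeWhile_cons_of_neg (by simp [hy]),
              List.dropWhile_cons_of_neg (by simp [hy])]
            simp only [List.length_nil, Nat.add_zero]
            have hfold : runsOf (y :: ys') (s + 1 + (xs.takeWhile (fun z => decide (z = 2))).length)
                = (y, s + 1 + (xs.takeWhile (fun z => decide (z = 2))).length,
                    s + 1 + (xs.takeWhile (fun z => decide (z = 2))).length + 1
                      + (ys'.takeWhile (fun z => decide (z = y))).length)
                  :: runsOf (ys'.dropWhile (fun z => decide (z = y)))
                      (s + 1 + (xs.takeWhile (fun z => decide (z = 2))).length + 1
                        + (ys'.takeWhile (fun z => decide (z = y))).length) := by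
              rw [runsOf]
            have ihr : ∀ (l' : Option Int),
                emitRuns (runsOf (y :: ys') (s + 1 + (xs.takeWhile (fun z => decide (z = 2))).length)) l'
                  = trimKeep (rawStruct (y :: ys') (s + 1 + (xs.takeWhile (fun z => decide (z = 2))).length)) l' := by
              intro l'
              apply ih _ _ _ (by simp only [List.length_cons]; omega)
            cases hk : keepGap last s
            · rw [hfold, emitRuns, if_pos rfl, if_neg hy, hk, if_neg (by simp), ← hfold, ihr,
                trimKeep, hk, if_neg (by simp)]
            · rw [hfold, emitRuns, if_pos rfl, if_neg hy, hk, if_pos rfl, ← hfold, ihr,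
                trimKeep, hk, if_pos rfl]
      · rw [runsOf, emitRuns_cons_ne2 x _ _ _ _ hx]
        have hall : ∀ y ∈ x :: xs.takeWhile (fun y => decide (y = x)), ¬ y = 2 := by
          intro y hy
          rcases List.mem_cons.mp hy with h | h
          · rw [h]; exact hx
          · have := List.mem_takeWhile_imp h
            simp only [decide_eq_true_eq] at this
            rw [this]; exact hx
        have hsplit : x :: xs
            = (x :: xs.takeWhile (fun y => decide (y = x))) ++ xs.dropWhile (fun y => decide (y = x)) := by
          simp [List.takeWhile_append_dropWhile]
        conv_rhs => rw [hsplit]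
        rw [rawStruct_skip_ne2 _ _ s hall]
        simp only [List.length_cons]
        rw [ih _ _ _ (by
          have := List.length_dropWhile_le (fun y => decide (y = x)) xs
          omega)]
        congr 2
        omega

theorem filt_map_eq (eps : List (Nat × Nat × Nat)) :
    ∀ (acc : List (Nat × Nat × Nat)),
      (eps.foldl (fun acc ep =>
        match acc.getLast? with
        | some prev => if (ep.1 : Int) - (prev.2.2 : Int) < 1300 then acc else acc ++ [ep]
        | none => acc ++ [ep]) acc).map (fun ep =>
          [("preictal_start", max (ep.1 : Int) ((ep.2.1 : Int) - 300)),
           ("ictal_start", (ep.2.1 : Int)),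
           ("ictal_end", (ep.2.2 : Int))])
      = acc.map (fun ep =>
          [("preictal_start", max (ep.1 : Int) ((ep.2.1 : Int) - 300)),
           ("ictal_start", (ep.2.1 : Int)),
           ("ictal_end", (ep.2.2 : Int))])
        ++ trimKeep eps (acc.getLast?.map (fun p => ((p.2.2 : Nat) : Int))) := by
  induction eps with
  | nil => intro acc; simp [trimKeep]
  | cons ep rest ih =>
    intro acc
    obtain ⟨ps, is_, ie⟩ := ep
    rw [List.foldl_cons]
    cases hlast : acc.getLast? with
    | none =>
      have hacc : acc = [] := List.getLast?_eq_none_iff.mp hlast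
      subst hacc
      rw [ih]
      simp [trimKeep, keepGap, mkEp]
    | some prev =>
      simp only [hlast]   -- reduces the `match acc.getLast?` in the folded step
      by_cases hgap : (ps : Int) - (prev.2.2 : Int) < 1300
      · rw [if_pos hgap, ih acc, hlast, trimKeep]
        have hk : keepGap (some ((prev.2.2 : Nat) : Int)) ps = false := by
          simp only [keepGap, decide_eq_false_iff_not]
          omega
        simp only [Option.map_some]
        rw [hk]
        simp
      · rw [if_neg hgap, ih (acc ++ [(ps, is_, ie)]), List.getLast?_concat]
        rw [trimKeep]
        have hk : keepGap (some ((prev.2.2 : Nat) : Int)) ps = true := by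
          simp only [keepGap, decide_eq_true_eq]
          omega
        simp only [Option.map_some]
        rw [hk]
        simp [mkEp]

theorem final_eq (labels : List Int) :
    find_seizure_episodes labels = find_seizure_episodes_alt labels := by
  show (List.map _ (List.foldl _ [] (rawEps labels 0))) = emitRuns (runsOf labels 0) none
  rw [filt_map_eq (rawEps labels 0) []]
  simp only [List.map_nil, List.getLast?_nil, Option.map_none, List.nil_append]
  rw [rawEps_eq_rawStruct labels labels.length labels 0 (le_refl _) (by simp)]
  rw [← emit_eq_trim labels.length labels 0 none (le_refl _)]

-- ===== VERDICT (by name: the statement is the Claim_ definition above) =====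
theorem find_seizure_episodes_spec : Claim_equal_find_seizure_episodes := by
  intro labels _
  unfold Spec_find_seizure_episodes
  exact final_eq labels
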